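-- pv_equiv track=rewrite | github.com/yhancsx/algorithm-weekly | coding_interview/kakao/kakao_20200425_3.py | countBalancingElement
-- ===== SOURCE A (Python) =====
-- def countBalancingElement(nums):
--     n = len(nums)
--     forward = [0] * (n + 1)
--     backward = [0] * (n + 1)
--     forward[0] = nums[0]
--     forward[1] = nums[1]
--     backward[n - 1] = nums[n - 1]
--     backward[n - 2] = nums[n - 2]
--
--     for i in range(2, n):
--         forward[i] = forward[i - 2] + nums[i]
--
--     for i in range(n - 3, -1, -1):
--         backward[i] = backward[i + 2] + nums[i]
--
--     c = 0
--     for i, num in enumerate(nums):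
--         f = forward[i] - num + backward[i + 1]
--         b = forward[i - 1] + backward[i] - num
--         if f == b:
--             c += 1
--
--     return c
-- ===== SOURCE B (Python) =====
-- def countBalancingElement(nums):
--     total_even = total_odd = 0
--     for i, num in enumerate(nums):
--         if i % 2 == 0:
--             total_even += num
--         else:
--             total_odd += num
--     left_even = left_odd = 0
--     c = 0
--     for i, num in enumerate(nums):
--         if i % 2 == 0:
--             right_even = total_even - left_even - num
--             right_odd = total_odd - left_odd
--         else:
--             right_even = total_even - left_even
--             right_odd = total_odd - left_odd - num
--         if left_even + right_odd == left_odd + right_even: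
--             c += 1
--         if i % 2 == 0:
--             left_even += num
--         else:
--             left_odd += num
--     return c
-- ===== Notes on version B (the rewrite author's own statement) =====
-- stated objective: alternative
-- what changed: B replaces A's two prefix/suffix parity-sum arrays (forward/backward of size n+1 built in three loops) by precomputed parity totals and two scalar running sums maintained in a single forward pass, using O(1) extra space instead of O(n).
import Mathlib
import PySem

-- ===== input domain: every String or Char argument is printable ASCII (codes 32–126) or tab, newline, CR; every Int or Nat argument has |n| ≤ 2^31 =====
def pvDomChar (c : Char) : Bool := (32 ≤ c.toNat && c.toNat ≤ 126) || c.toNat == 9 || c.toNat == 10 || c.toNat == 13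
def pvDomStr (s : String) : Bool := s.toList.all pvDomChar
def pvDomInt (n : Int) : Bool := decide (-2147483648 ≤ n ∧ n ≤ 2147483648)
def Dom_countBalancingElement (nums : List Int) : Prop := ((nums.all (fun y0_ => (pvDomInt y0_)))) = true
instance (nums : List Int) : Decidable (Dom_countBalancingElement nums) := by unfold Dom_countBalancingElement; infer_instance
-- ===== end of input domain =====

-- B replaces A's two prefix/suffix parity-sum arrays by parity totals plus scalar running sums
-- in one forward pass (O(1) extra space instead of O(n)); same time complexity.

-- ===== PORT A =====
-- the body of A's first for-loop (forward[i] = forward[i-2] + nums[i])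
def cbeStepF (nums : List Int) (fwAcc : List Int) (i : Int) : List Int :=
  PySem.List.pySetD fwAcc i
    (PySem.List.pyGetD fwAcc (i - 2) 0 + PySem.List.pyGetD nums i 0)

-- the body of A's second for-loop (backward[i] = backward[i+2] + nums[i])
def cbeStepB (nums : List Int) (bwAcc : List Int) (i : Int) : List Int :=
  PySem.List.pySetD bwAcc i
    (PySem.List.pyGetD bwAcc (i + 2) 0 + PySem.List.pyGetD nums i 0)

-- the body of A's counting loop over enumerate(nums)
def cbeStepC (fw bw : List Int) (c : Int) (p : Int × Int) : Int :=
  let f := PySem.List.pyGetD fw p.1 0 - p.2 + PySem.List.pyGetD bw (p.1 + 1) 0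
  let b := PySem.List.pyGetD fw (p.1 - 1) 0 + PySem.List.pyGetD bw p.1 0 - p.2
  if f = b then c + 1 else c

def countBalancingElement (nums : List Int) : Int :=
  let n : Nat := nums.length
  let fw0 : List Int := List.replicate (n + 1) 0
  let bw0 : List Int := List.replicate (n + 1) 0
  let fw1 := PySem.List.pySetD fw0 0 (PySem.List.pyGetD nums 0 0)
  let fw2 := PySem.List.pySetD fw1 1 (PySem.List.pyGetD nums 1 0)
  let bw1 := PySem.List.pySetD bw0 ((n : Int) - 1) (PySem.List.pyGetD nums ((n : Int) - 1) 0)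
  let bw2 := PySem.List.pySetD bw1 ((n : Int) - 2) (PySem.List.pyGetD nums ((n : Int) - 2) 0)
  let fw := (PySem.List.pyRange 2 (n : Int) 1).foldl (cbeStepF nums) fw2
  let bw := (PySem.List.pyRange ((n : Int) - 3) (-1) (-1)).foldl (cbeStepB nums) bw2
  (PySem.List.enumerate nums 0).foldl (cbeStepC fw bw) 0

-- ===== PORT B =====
-- first pass of B: accumulate (total_even, total_odd)
def cbeAltTot (t : Int × Int) (p : Int × Int) : Int × Int :=
  if PySem.Int.mod p.1 2 = 0 then (t.1 + p.2, t.2) else (t.1, t.2 + p.2)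

-- second pass of B: state (left_even, left_odd, c)
def cbeAltStep (totals : Int × Int) (st : Int × Int × Int) (p : Int × Int) : Int × Int × Int :=
  let rr : Int × Int :=
    if PySem.Int.mod p.1 2 = 0 then (totals.1 - st.1 - p.2, totals.2 - st.2.1)
    else (totals.1 - st.1, totals.2 - st.2.1 - p.2)
  let c' := if st.1 + rr.2 = st.2.1 + rr.1 then st.2.2 + 1 else st.2.2
  if PySem.Int.mod p.1 2 = 0 then (st.1 + p.2, st.2.1, c') else (st.1, st.2.1 + p.2, c')

def countBalancingElement_alt (nums : List Int) : Int :=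
  let totals := (PySem.List.enumerate nums 0).foldl cbeAltTot (0, 0)
  let final := (PySem.List.enumerate nums 0).foldl (cbeAltStep totals) (0, 0, 0)
  final.2.2

-- ===== PRECONDITION & SPEC =====
-- Pre_ excludes lists of length < 2, on which A raises IndexError (unconditional nums[1] / nums[0] access).
def Pre_countBalancingElement (nums : List Int) : Prop := 2 ≤ nums.length
instance (nums : List Int) : Decidable (Pre_countBalancingElement nums) := by
  unfold Pre_countBalancingElement; infer_instance

def pvWitness_countBalancingElement : List Int := [1, 2, 3]

def Spec_countBalancingElement (nums : List Int) (out : Int) : Prop :=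
  out = countBalancingElement_alt nums
instance (nums : List Int) (out : Int) : Decidable (Spec_countBalancingElement nums out) := by
  unfold Spec_countBalancingElement; infer_instance

-- ===== CLAIM (what is proved, stated in full; the proofs are below) =====
def Claim_equal_countBalancingElement : Prop := ∀ (nums : List Int),
  Dom_countBalancingElement nums → Pre_countBalancingElement nums →
    Spec_countBalancingElement nums (countBalancingElement nums)

-- ===== LEMMAS AND PROOFS =====

-- (left_even, left_odd) after the first m elements: sums at even / odd indices below m
def cbeSums (nums : List Int) : Nat → Int × Int
  | 0 => (0, 0)
  | m + 1 =>
    let p := cbeSums nums m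
    if m % 2 = 0 then (p.1 + nums.getD m 0, p.2) else (p.1, p.2 + nums.getD m 0)

-- value of A's forward[k] for k < n
def cbeFwd (nums : List Int) (k : Nat) : Int :=
  if k % 2 = 0 then (cbeSums nums (k + 1)).1 else (cbeSums nums (k + 1)).2

-- value of A's backward[k] for k ≤ n (0 at k = n)
def cbeBwd (nums : List Int) (k : Nat) : Int :=
  if k % 2 = 0 then (cbeSums nums nums.length).1 - (cbeSums nums k).1
  else (cbeSums nums nums.length).2 - (cbeSums nums k).2

-- whether index m is counted (B's condition, expressed through cbeSums)
def cbeCond (nums : List Int) (m : Nat) : Bool :=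
  let t := cbeSums nums nums.length
  let p := cbeSums nums m
  if m % 2 = 0 then decide (p.1 + (t.2 - p.2) = p.2 + (t.1 - p.1 - nums.getD m 0))
  else decide (p.1 + (t.2 - p.2 - nums.getD m 0) = p.2 + (t.1 - p.1))

-- number of counted indices below m
def cbeCnt (nums : List Int) : Nat → Int
  | 0 => 0
  | m + 1 => cbeCnt nums m + (if cbeCond nums m then 1 else 0)

theorem cbe_getD_set (xs : List Int) (i k : Nat) (v d : Int) :
    (xs.set i v).getD k d = if k = i ∧ i < xs.length then v else xs.getD k d := by
  rcases Nat.lt_or_ge k xs.length with h | h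
  · rw [List.getD_eq_getElem _ _ (by simpa using h), List.getD_eq_getElem _ _ h]
    by_cases hk : k = i
    · subst hk
      rw [List.getElem_set_self (by simpa using h)]
      simp [h]
    · rw [List.getElem_set_ne (by omega)]
      simp [hk]
  · rw [List.getD_eq_default _ _ (by simpa using h), List.getD_eq_default _ _ h]
    split_ifs with h1
    · omega
    · rfl

theorem cbeSums_succ_even (nums : List Int) (m : Nat) (h : m % 2 = 0) :
    cbeSums nums (m + 1) = ((cbeSums nums m).1 + nums.getD m 0, (cbeSums nums m).2) := by
  simp [cbeSums, h]

theorem cbeSums_succ_odd (nums : List Int) (m : Nat) (h : m % 2 = 1) :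
    cbeSums nums (m + 1) = ((cbeSums nums m).1, (cbeSums nums m).2 + nums.getD m 0) := by
  simp [cbeSums, h]

theorem cbeFwd_step (nums : List Int) (m : Nat) :
    cbeFwd nums (m + 2) = cbeFwd nums m + nums.getD (m + 2) 0 := by
  rcases Nat.mod_two_eq_zero_or_one m with h | h
  · rw [cbeFwd, cbeFwd, if_pos (by omega), if_pos h,
      cbeSums_succ_even _ (m + 2) (by omega), cbeSums_succ_odd _ (m + 1) (by omega)]
  · rw [cbeFwd, cbeFwd, if_neg (by omega), if_neg (by omega),
      cbeSums_succ_odd _ (m + 2) (by omega), cbeSums_succ_even _ (m + 1) (by omega)]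

theorem cbeBwd_step (nums : List Int) (k : Nat) :
    cbeBwd nums k = cbeBwd nums (k + 2) + nums.getD k 0 := by
  rcases Nat.mod_two_eq_zero_or_one k with h | h
  · rw [cbeBwd, cbeBwd, if_pos h, if_pos (by omega),
      show k + 2 = (k + 1) + 1 from rfl, cbeSums_succ_odd _ (k + 1) (by omega),
      cbeSums_succ_even _ k h]
    ring
  · rw [cbeBwd, cbeBwd, if_neg (by omega), if_neg (by omega),
      show k + 2 = (k + 1) + 1 from rfl, cbeSums_succ_even _ (k + 1) (by omega),
      cbeSums_succ_odd _ k h]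
    ring

theorem cbeBwd_len (nums : List Int) : cbeBwd nums nums.length = 0 := by
  simp [cbeBwd]

theorem cbeBwd_pred1 (nums : List Int) (h : 1 ≤ nums.length) :
    cbeBwd nums (nums.length - 1) = nums.getD (nums.length - 1) 0 := by
  rcases Nat.mod_two_eq_zero_or_one (nums.length - 1) with h1 | h1
  · rw [cbeBwd, if_pos h1, show nums.length = (nums.length - 1) + 1 by omega,
      cbeSums_succ_even _ _ h1]
    simp
  · rw [cbeBwd, if_neg (by omega), show nums.length = (nums.length - 1) + 1 by omega,
      cbeSums_succ_odd _ _ h1]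
    simp

theorem cbeBwd_pred2 (nums : List Int) (h : 2 ≤ nums.length) :
    cbeBwd nums (nums.length - 2) = nums.getD (nums.length - 2) 0 := by
  have := cbeBwd_step nums (nums.length - 2)
  rw [show nums.length - 2 + 2 = nums.length by omega, cbeBwd_len] at this
  omega

theorem cbeFwdFold (nums : List Int) (t : Nat) (h2 : 2 ≤ t)
    (ht : t ≤ nums.length) (fw : List Int) (hl : fw.length = nums.length + 1)
    (hinv : ∀ k : Nat, k ≤ nums.length →
      fw.getD k 0 = if k < t then cbeFwd nums k else 0) :
    ((PySem.List.pyRange (t : Int) (nums.length : Int) 1).foldl (cbeStepF nums) fw).length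
        = nums.length + 1 ∧
    ∀ k : Nat, k ≤ nums.length →
      ((PySem.List.pyRange (t : Int) (nums.length : Int) 1).foldl (cbeStepF nums) fw).getD k 0
        = if k < nums.length then cbeFwd nums k else 0 := by
  induction hd : nums.length - t generalizing t fw with
  | zero =>
    have : t = nums.length := by omega
    subst this
    rw [PySem.List.pyRange_one_eq_nil (le_refl _)]
    exact ⟨hl, hinv⟩
  | succ d ih =>
    rw [PySem.List.pyRange_one_cons (by exact_mod_cast Nat.lt_of_sub_eq_succ hd)]
    simp only [List.foldl_cons]
    have hstep : cbeStepF nums fw (t : Int)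
        = fw.set t (fw.getD (t - 2) 0 + nums.getD t 0) := by
      rw [cbeStepF, show ((t : Int) - 2) = ((t - 2 : Nat) : Int) by omega,
        PySem.List.pyGetD_natCast, PySem.List.pyGetD_natCast, PySem.List.pySetD_natCast]
    rw [hstep, show ((t : Int) + 1) = ((t + 1 : Nat) : Int) by push_cast; ring]
    apply ih (t + 1) (by omega) (by omega)
    · simpa using hl
    · intro k hk
      rw [cbe_getD_set]
      split_ifs with hc hlt hlt
      · obtain ⟨rfl, -⟩ := hc
        have hst := cbeFwd_step nums (k - 2)
        rw [show k - 2 + 2 = k by omega] at hst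
        rw [hinv (k - 2) (by omega), if_pos (by omega), hst]
      · obtain ⟨rfl, -⟩ := hc
        omega
      · have hne : k ≠ t := fun h => hc ⟨h, by omega⟩
        rw [hinv k hk, if_pos (by omega)]
      · rw [hinv k hk, if_neg (by omega)]
    · omega

theorem cbeBwdFold (nums : List Int) (t : Int) (hm : -1 ≤ t)
    (ht : t ≤ (nums.length : Int) - 3) (bw : List Int) (hl : bw.length = nums.length + 1)
    (hinv : ∀ k : Nat, k ≤ nums.length →
      bw.getD k 0 = if t < (k : Int) then cbeBwd nums k else 0) :
    ((PySem.List.pyRange t (-1) (-1)).foldl (cbeStepB nums) bw).length = nums.length + 1 ∧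
    ∀ k : Nat, k ≤ nums.length →
      ((PySem.List.pyRange t (-1) (-1)).foldl (cbeStepB nums) bw).getD k 0 = cbeBwd nums k := by
  induction hd : (t + 1).toNat generalizing t bw with
  | zero =>
    have : t = -1 := by omega
    subst this
    rw [PySem.List.pyRange_neg_one_eq_nil (le_refl _)]
    simp only [List.foldl_nil]
    refine ⟨hl, fun k hk => ?_⟩
    rw [hinv k hk, if_pos (by omega)]
  | succ d ih =>
    have h0 : 0 ≤ t := by omega
    obtain ⟨m, rfl⟩ := Int.eq_ofNat_of_zero_le h0
    rw [PySem.List.pyRange_neg_one_cons (by omega : (-1 : Int) < (m : Int))]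
    simp only [List.foldl_cons]
    have hstep : cbeStepB nums bw (m : Int)
        = bw.set m (bw.getD (m + 2) 0 + nums.getD m 0) := by
      rw [cbeStepB, show ((m : Int) + 2) = ((m + 2 : Nat) : Int) by push_cast; ring,
        PySem.List.pyGetD_natCast, PySem.List.pyGetD_natCast, PySem.List.pySetD_natCast]
    rw [hstep]
    apply ih ((m : Int) - 1) (by omega) (by omega)
    · simpa using hl
    · intro k hk
      rw [cbe_getD_set]
      split_ifs with hc hlt hlt
      · obtain ⟨rfl, -⟩ := hc
        rw [hinv (k + 2) (by omega), if_pos (by push_cast; omega)]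
        exact (cbeBwd_step nums k).symm
      · obtain ⟨rfl, -⟩ := hc
        omega
      · have hne : k ≠ m := fun h => hc ⟨h, by omega⟩
        rw [hinv k hk, if_pos (by omega)]
      · rw [hinv k hk, if_neg (by omega)]
    · omega

theorem cbe_mod2 (m : Nat) :
    PySem.Int.mod (m : Int) 2 = ((m % 2 : Nat) : Int) := by
  rw [show (2 : Int) = ((2 : Nat) : Int) from rfl, PySem.Int.mod_natCast]

-- enumerate of take (m+1) splits off the last pair

theorem cbe_enum_take_succ (nums : List Int) (m : Nat) (hm : m < nums.length) :
    PySem.List.enumerate (nums.take (m + 1)) 0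
      = PySem.List.enumerate (nums.take m) 0 ++ [((m : Int), nums.getD m 0)] := by
  rw [List.take_add_one, List.getElem?_eq_getElem hm, PySem.List.enumerate_append]
  simp [PySem.List.enumerate_cons, PySem.List.enumerate_nil,
    List.length_take, Nat.min_eq_left (le_of_lt hm), List.getElem?_eq_getElem hm]

theorem cbeTotFold (nums : List Int) (m : Nat) (hm : m ≤ nums.length) :
    (PySem.List.enumerate (nums.take m) 0).foldl cbeAltTot (0, 0) = cbeSums nums m := by
  induction m with
  | zero => simp [PySem.List.enumerate_nil, cbeSums]
  | succ m ih =>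
    rw [cbe_enum_take_succ nums m (by omega), List.foldl_append, ih (by omega)]
    simp only [List.foldl_cons, List.foldl_nil, cbeAltTot]
    rcases Nat.mod_two_eq_zero_or_one m with h | h
    · rw [cbeSums_succ_even nums m h,
        if_pos (show PySem.Int.mod (m : Int) 2 = 0 by rw [cbe_mod2, h]; rfl)]
    · rw [cbeSums_succ_odd nums m h,
        if_neg (show ¬ PySem.Int.mod (m : Int) 2 = 0 by rw [cbe_mod2, h]; decide)]

theorem cbeCntFoldB (nums : List Int) (m : Nat) (hm : m ≤ nums.length) :
    (PySem.List.enumerate (nums.take m) 0).foldl (cbeAltStep (cbeSums nums nums.length)) (0, 0, 0)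
      = ((cbeSums nums m).1, (cbeSums nums m).2, cbeCnt nums m) := by
  induction m with
  | zero => simp [PySem.List.enumerate_nil, cbeSums, cbeCnt]
  | succ m ih =>
    rw [cbe_enum_take_succ nums m (by omega), List.foldl_append, ih (by omega)]
    simp only [List.foldl_cons, List.foldl_nil, cbeAltStep]
    rcases Nat.mod_two_eq_zero_or_one m with h | h
    · rw [cbeSums_succ_even nums m h, cbeCnt]
      simp only [cbe_mod2, h, cbeCond]
      norm_num
      split_ifs <;> simp
    · rw [cbeSums_succ_odd nums m h, cbeCnt]
      simp only [cbe_mod2, h, cbeCond]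
      norm_num
      split_ifs <;> simp_all

theorem cbeCondA (nums : List Int) (m : Nat) (hm : m < nums.length) :
    (cbeFwd nums m - nums.getD m 0 + cbeBwd nums (m + 1)
      = (if m = 0 then 0 else cbeFwd nums (m - 1)) + cbeBwd nums m - nums.getD m 0)
      ↔ cbeCond nums m = true := by
  rcases Nat.mod_two_eq_zero_or_one m with h | h
  · have hfm : (if m = 0 then 0 else cbeFwd nums (m - 1)) = (cbeSums nums m).2 := by
      rcases Nat.eq_zero_or_pos m with rfl | hpos
      · simp [cbeSums]
      · rw [if_neg (by omega), cbeFwd, if_neg (show ¬ ((m - 1) % 2 = 0) by omega),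
          show m - 1 + 1 = m by omega]
    have h1 : cbeFwd nums m = (cbeSums nums m).1 + nums.getD m 0 := by
      rw [cbeFwd, if_pos h, cbeSums_succ_even nums m h]
    have h2 : cbeBwd nums (m + 1)
        = (cbeSums nums nums.length).2 - (cbeSums nums m).2 := by
      rw [cbeBwd, if_neg (show ¬ ((m + 1) % 2 = 0) by omega), cbeSums_succ_even nums m h]
    have h3 : cbeBwd nums m
        = (cbeSums nums nums.length).1 - (cbeSums nums m).1 := by
      rw [cbeBwd, if_pos h]
    rw [h1, h2, h3, hfm, cbeCond]
    simp only [h]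
    norm_num
    constructor <;> intro hx <;> omega
  · have hfm : (if m = 0 then 0 else cbeFwd nums (m - 1)) = (cbeSums nums m).1 := by
      rw [if_neg (by omega), cbeFwd, if_pos (show (m - 1) % 2 = 0 by omega),
        show m - 1 + 1 = m by omega]
    have h1 : cbeFwd nums m = (cbeSums nums m).2 + nums.getD m 0 := by
      rw [cbeFwd, if_neg (by omega), cbeSums_succ_odd nums m h]
    have h2 : cbeBwd nums (m + 1)
        = (cbeSums nums nums.length).1 - (cbeSums nums m).1 := by
      rw [cbeBwd, if_pos (show (m + 1) % 2 = 0 by omega), cbeSums_succ_odd nums m h]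
    have h3 : cbeBwd nums m
        = (cbeSums nums nums.length).2 - (cbeSums nums m).2 := by
      rw [cbeBwd, if_neg (by omega)]
    rw [h1, h2, h3, hfm, cbeCond]
    simp only [h]
    norm_num
    constructor <;> intro hx <;> omega

theorem cbeCntFoldA (nums : List Int) (hn : 2 ≤ nums.length) (fw bw : List Int)
    (hfl : fw.length = nums.length + 1)
    (hf : ∀ k : Nat, k ≤ nums.length →
      fw.getD k 0 = if k < nums.length then cbeFwd nums k else 0)
    (hb : ∀ k : Nat, k ≤ nums.length → bw.getD k 0 = cbeBwd nums k)
    (m : Nat) (hm : m ≤ nums.length) :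
    (PySem.List.enumerate (nums.take m) 0).foldl (cbeStepC fw bw) 0 = cbeCnt nums m := by
  induction m with
  | zero => simp [PySem.List.enumerate_nil, cbeCnt]
  | succ m ih =>
    rw [cbe_enum_take_succ nums m (by omega), List.foldl_append, ih (by omega)]
    simp only [List.foldl_cons, List.foldl_nil, cbeStepC]
    -- evaluate the four pyGetD accesses
    have e1 : PySem.List.pyGetD fw ((m : Int)) 0 = cbeFwd nums m := by
      rw [PySem.List.pyGetD_natCast, hf m (by omega), if_pos (by omega)]
    have e2 : PySem.List.pyGetD bw ((m : Int) + 1) 0 = cbeBwd nums (m + 1) := by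
      rw [show ((m : Int) + 1) = ((m + 1 : Nat) : Int) by push_cast; ring,
        PySem.List.pyGetD_natCast, hb (m + 1) (by omega)]
    have e3 : PySem.List.pyGetD bw ((m : Int)) 0 = cbeBwd nums m := by
      rw [PySem.List.pyGetD_natCast, hb m (by omega)]
    have e4 : PySem.List.pyGetD fw ((m : Int) - 1) 0
        = (if m = 0 then 0 else cbeFwd nums (m - 1)) := by
      rcases Nat.eq_zero_or_pos m with rfl | hpos
      · rw [show ((0 : Nat) : Int) - 1 = (-1 : Int) by ring, if_pos rfl,
          PySem.List.pyGetD_neg_one fw 0 (by intro hne; simp [hne] at hfl)]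
        have hlast : fw.getLast (by intro hne; simp [hne] at hfl)
            = fw.getD (fw.length - 1) 0 := by
          rw [List.getLast_eq_getElem, List.getD_eq_getElem _ _ (by omega)]
        rw [hlast, hfl, Nat.add_sub_cancel, hf nums.length (le_refl _), if_neg (by omega)]
      · rw [show ((m : Int) - 1) = ((m - 1 : Nat) : Int) by omega,
          PySem.List.pyGetD_natCast, hf (m - 1) (by omega), if_pos (by omega),
          if_neg (by omega)]
    rw [e1, e2, e3, e4, cbeCnt]
    by_cases hc : cbeCond nums m = true
    · rw [if_pos ((cbeCondA nums m (by omega)).mpr hc), hc, if_pos rfl]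
    · rw [if_neg (fun hx => hc ((cbeCondA nums m (by omega)).mp hx)),
        if_neg (by simpa using hc)]
      omega

-- ===== VERDICT (by name: the statement is the Claim_ definition above) =====
theorem countBalancingElement_spec : Claim_equal_countBalancingElement := by
  intro nums _ hpre
  have hn : 2 ≤ nums.length := hpre
  unfold Spec_countBalancingElement
  -- B's side
  have ht := cbeTotFold nums nums.length (le_refl _)
  have hcB := cbeCntFoldB nums nums.length (le_refl _)
  rw [List.take_length] at ht hcB
  have hB : countBalancingElement_alt nums = cbeCnt nums nums.length := by
    rw [countBalancingElement_alt, ht, hcB]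
  -- A's side
  rw [hB]
  simp only [countBalancingElement]
  have hrep : ∀ j : Nat, (List.replicate (nums.length + 1) (0 : Int)).getD j 0 = 0 := by
    intro j
    rcases Nat.lt_or_ge j (nums.length + 1) with hj | hj
    · rw [List.getD_eq_getElem _ _ (by simpa using hj)]; simp
    · rw [List.getD_eq_default _ _ (by simpa using hj)]
  -- the seeded forward list
  have hfw2eq : PySem.List.pySetD (PySem.List.pySetD (List.replicate (nums.length + 1) 0) 0
        (PySem.List.pyGetD nums 0 0)) 1 (PySem.List.pyGetD nums 1 0)
      = ((List.replicate (nums.length + 1) 0).set 0 (nums.getD 0 0)).set 1 (nums.getD 1 0) := by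
    rw [PySem.List.pyGetD_zero, show (1 : Int) = ((1 : Nat) : Int) by norm_num,
      PySem.List.pyGetD_natCast, show (0 : Int) = ((0 : Nat) : Int) by norm_num,
      PySem.List.pySetD_natCast, PySem.List.pySetD_natCast]
  rw [hfw2eq]
  have hfwres := cbeFwdFold nums 2 (le_refl _) hn
    (((List.replicate (nums.length + 1) 0).set 0 (nums.getD 0 0)).set 1 (nums.getD 1 0))
    (by simp)
    (by
      intro k hk
      rw [cbe_getD_set, cbe_getD_set]
      rcases Nat.eq_zero_or_pos k with rfl | hk0
      · rw [if_neg (by simp), if_pos ⟨rfl, by simp⟩, if_pos (by omega)]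
        simp [cbeFwd, cbeSums]
      · rcases Nat.lt_or_ge k 2 with hk2 | hk2
        · have hk1 : k = 1 := by omega
          subst hk1
          rw [if_pos ⟨rfl, by simp; omega⟩, if_pos (by omega)]
          norm_num [cbeFwd, cbeSums]
        · rw [if_neg (by omega), if_neg (by omega), if_neg (by omega), hrep])
  simp only [Nat.cast_ofNat] at hfwres
  -- the seeded backward list
  have hbw2eq : PySem.List.pySetD (PySem.List.pySetD (List.replicate (nums.length + 1) 0)
        ((nums.length : Int) - 1) (PySem.List.pyGetD nums ((nums.length : Int) - 1) 0))
        ((nums.length : Int) - 2) (PySem.List.pyGetD nums ((nums.length : Int) - 2) 0)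
      = ((List.replicate (nums.length + 1) 0).set (nums.length - 1)
          (nums.getD (nums.length - 1) 0)).set (nums.length - 2)
          (nums.getD (nums.length - 2) 0) := by
    rw [show ((nums.length : Int) - 1) = ((nums.length - 1 : Nat) : Int) by omega,
      show ((nums.length : Int) - 2) = ((nums.length - 2 : Nat) : Int) by omega,
      PySem.List.pyGetD_natCast, PySem.List.pyGetD_natCast,
      PySem.List.pySetD_natCast, PySem.List.pySetD_natCast]
  rw [hbw2eq]
  have hbwres := cbeBwdFold nums ((nums.length : Int) - 3) (by omega) (le_refl _)
    (((List.replicate (nums.length + 1) 0).set (nums.length - 1)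
        (nums.getD (nums.length - 1) 0)).set (nums.length - 2)
        (nums.getD (nums.length - 2) 0))
    (by simp)
    (by
      intro k hk
      rw [cbe_getD_set, cbe_getD_set]
      by_cases hk2 : k = nums.length - 2
      · subst hk2
        rw [if_pos ⟨rfl, by simp⟩, if_pos (by omega)]
        exact (cbeBwd_pred2 nums hn).symm
      · by_cases hk1 : k = nums.length - 1
        · subst hk1
          rw [if_neg (by omega), if_pos ⟨rfl, by simp⟩, if_pos (by omega)]
          exact (cbeBwd_pred1 nums (by omega)).symm
        · by_cases hkn : k = nums.length
          · subst hkn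
            rw [if_neg (by omega), if_neg (by omega), if_pos (by omega), hrep, cbeBwd_len]
          · rw [if_neg (by omega), if_neg (by omega), if_neg (by omega), hrep])
  have hA := cbeCntFoldA nums hn _ _ hfwres.1 hfwres.2 hbwres.2 nums.length (le_refl _)
  rw [List.take_length] at hA
  exact hA
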